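-- pv_equiv track=rewrite | github.com/Izugance/justify | justify_text.py | justified_line_stream
-- ===== SOURCE A (Python) =====
-- from math import ceil
--
-- def justified_line_stream(line, maxlen, spaces=None, last_line=False):
--     if not last_line:
--         # Quiz: How do you split m things amongst n people in a line
--         # such that all but the last person get at least one thing, but
--         # those further left get the most, progressively? (Below is a
--         # hint.)
--         space_groups = len(line) - 1  # Regions to split spaces.
--         for word in line:
--             if spaces and space_groups:
--                 word_space = ceil(spaces / space_groups)
--                 yield word + (" " * word_space)
--                 spaces -= word_space
--                 space_groups -= 1
--             else:
--                 yield word + "\n"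
--     # Don't justify the last line, and don't add a newline.
--     else:
--         yield " ".join(line)
-- ===== SOURCE B (Python) =====
-- def justified_line_stream(line, maxlen, spaces=None, last_line=False):
--     if last_line:
--         # Don't justify the last line, and don't add a newline.
--         yield " ".join(line)
--         return
--     space_groups = len(line) - 1
--     # Closed-form allocation: the first `rem` gaps get base+1 spaces, the rest base.
--     base, rem = divmod(spaces, space_groups) if spaces and space_groups else (0, 0)
--     for i, word in enumerate(line):
--         if i >= space_groups:
--             yield word + "\n"
--         else:
--             ws = base + (1 if i < rem else 0)
--             yield word + " " * ws if ws > 0 else word + "\n"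
-- ===== Notes on version B (the rewrite author's own statement) =====
-- stated objective: simpler
-- what changed: Replaces the running ceil-and-decrement state loop (spaces and space_groups mutated each iteration) with a single up-front divmod allocation and a stateless enumerate pass computing each gap's width in closed form; Pre_ excludes negative spaces on justified multi-word lines, outside the task's natural domain, where A pads words with the empty string (' '*negative) while B ends them with newlines.
-- outside the precondition, e.g. on justified_line_stream(['a', 'b', 'c'], 10, -3, False): A returns ['a', 'b', 'c\n'], B returns ['a\n', 'b\n', 'c\n']
import Mathlib
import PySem

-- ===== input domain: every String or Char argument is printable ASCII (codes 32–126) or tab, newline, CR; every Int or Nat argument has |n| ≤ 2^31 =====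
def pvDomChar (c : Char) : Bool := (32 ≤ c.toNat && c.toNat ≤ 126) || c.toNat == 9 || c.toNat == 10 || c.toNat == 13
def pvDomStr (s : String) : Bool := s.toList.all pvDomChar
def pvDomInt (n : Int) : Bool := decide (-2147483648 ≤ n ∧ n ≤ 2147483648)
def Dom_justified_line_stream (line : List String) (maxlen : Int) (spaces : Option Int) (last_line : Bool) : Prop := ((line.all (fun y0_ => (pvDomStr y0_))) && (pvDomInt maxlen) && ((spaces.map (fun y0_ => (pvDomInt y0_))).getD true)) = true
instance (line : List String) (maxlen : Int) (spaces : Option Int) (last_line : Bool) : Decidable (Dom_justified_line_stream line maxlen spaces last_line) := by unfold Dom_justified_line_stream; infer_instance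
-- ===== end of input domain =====

-- B replaces A's running ceil-and-decrement state loop by a single up-front divmod
-- allocation and a stateless pass over the words (objective: simpler; same cost).
-- Both Pythons are generators; the ports return the list of yielded strings.

-- " " * n  (Python string repetition; empty for n ≤ 0)
def pvNSpaces (n : Int) : String := String.ofList (PySem.List.pyRepeat [' '] n)

-- ===== PORT A =====
-- the 'for word in line' loop of A; state = (spaces, space_groups).
-- ceil(spaces / space_groups): A uses float division + math.ceil, which is exact for
-- the |spaces| ≤ 2^31 in Dom; ported as integer ceiling division -((-s) // sg).
def pvALoop (sp : Option Int) (sg : Int) : List String → List String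
  | [] => []
  | w :: ws =>
    match sp with
    | some s =>
      if s ≠ 0 ∧ sg ≠ 0 then
        let wsp := -(PySem.Int.floordiv (-s) sg)
        (w ++ pvNSpaces wsp) :: pvALoop (some (s - wsp)) (sg - 1) ws
      else (w ++ "\n") :: pvALoop (some s) sg ws
    | none => (w ++ "\n") :: pvALoop none sg ws

def justified_line_stream (line : List String) (maxlen : Int) (spaces : Option Int) (last_line : Bool) : List String :=
  if ¬ last_line then
    pvALoop spaces ((line.length : Int) - 1) line
  else
    [PySem.Str.join " " line]

-- ===== PORT B =====
-- the 'for i, word in enumerate(line)' loop of B (i is the running index)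
def pvBLoop (base rem sg : Int) : Int → List String → List String
  | _, [] => []
  | i, w :: ws =>
    (if sg ≤ i then w ++ "\n"
     else
       let wsp := base + (if i < rem then 1 else 0)
       if 0 < wsp then w ++ pvNSpaces wsp else w ++ "\n") :: pvBLoop base rem sg (i + 1) ws

def justified_line_stream_alt (line : List String) (maxlen : Int) (spaces : Option Int) (last_line : Bool) : List String :=
  if last_line then
    [PySem.Str.join " " line]
  else
    let sg := (line.length : Int) - 1
    let p : Int × Int :=
      match spaces with
      | some s => if s ≠ 0 ∧ sg ≠ 0 then (PySem.Int.floordiv s sg, PySem.Int.mod s sg) else (0, 0)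
      | none => (0, 0)
    pvBLoop p.1 p.2 sg 0 line

-- ===== PRECONDITION & SPEC =====
-- Pre_ restricts spaces to the task's natural domain (None or a nonnegative count)
-- whenever it matters (a line of several words being justified): on negative spaces
-- A returns words padded with the empty string (' ' * negative), an artefact of
-- Python string repetition, while B ends such words with newlines.
def Pre_justified_line_stream (line : List String) (maxlen : Int) (spaces : Option Int) (last_line : Bool) : Prop :=
  0 ≤ spaces.getD 0 ∨ last_line = true ∨ line.length ≤ 1
instance (line : List String) (maxlen : Int) (spaces : Option Int) (last_line : Bool) : Decidable (Pre_justified_line_stream line maxlen spaces last_line) := by unfold Pre_justified_line_stream; infer_instance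

def pvWitness_justified_line_stream : List String × Int × Option Int × Bool :=
  (["ab", "c", "de"], 10, some 5, false)

def Spec_justified_line_stream (line : List String) (maxlen : Int) (spaces : Option Int) (last_line : Bool) (out : List String) : Prop := out = justified_line_stream_alt line maxlen spaces last_line
instance (line : List String) (maxlen : Int) (spaces : Option Int) (last_line : Bool) (out : List String) : Decidable (Spec_justified_line_stream line maxlen spaces last_line out) := by unfold Spec_justified_line_stream; infer_instance

-- ===== CLAIM (what is proved, stated in full; the proofs are below) =====
def Claim_equal_justified_line_stream : Prop := ∀ (line : List String) (maxlen : Int) (spaces : Option Int) (last_line : Bool), Dom_justified_line_stream line maxlen spaces last_line → Pre_justified_line_stream line maxlen spaces last_line → Spec_justified_line_stream line maxlen spaces last_line (justified_line_stream line maxlen spaces last_line)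

-- ===== LEMMAS AND PROOFS =====

lemma aloop_none (sg : Int) : ∀ ws, pvALoop none sg ws = ws.map (· ++ "\n") := by
  intro ws; induction ws with
  | nil => rfl
  | cons w ws ih => simp [pvALoop, ih]

lemma aloop_zero (sg : Int) : ∀ ws, pvALoop (some 0) sg ws = ws.map (· ++ "\n") := by
  intro ws; induction ws with
  | nil => rfl
  | cons w ws ih => simp [pvALoop, ih]

lemma aloop_sgzero (s : Int) : ∀ ws, pvALoop (some s) 0 ws = ws.map (· ++ "\n") := by
  intro ws; induction ws with
  | nil => rfl
  | cons w ws ih => simp [pvALoop, ih]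

lemma bloop_newlines (base rem sg : Int) (hb : 0 ≤ base) :
    ∀ ws (i : Int), (sg ≤ i ∨ (base = 0 ∧ rem ≤ i)) →
      pvBLoop base rem sg i ws = ws.map (· ++ "\n") := by
  intro ws; induction ws with
  | nil => intro i _; rfl
  | cons w ws ih =>
      intro i h
      have hnext : sg ≤ i + 1 ∨ (base = 0 ∧ rem ≤ i + 1) := by omega
      simp only [pvBLoop]
      rw [ih (i + 1) hnext]
      rcases h with h | h
      · rw [if_pos h, List.map_cons]
      · by_cases hsg : sg ≤ i
        · rw [if_pos hsg, List.map_cons]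
        · rw [if_neg hsg]
          have hw : ¬ (0 < base + (if i < rem then 1 else 0)) := by
            rw [if_neg (by omega)]; omega
          simp only [hw, if_false, List.map_cons]

-- ceiling division of the block q*d + c (0 ≤ c < d) by d
lemma ceil_val (q c d : Int) (hd : 0 < d) (h0 : 0 ≤ c) (h1 : c < d) :
    -(PySem.Int.floordiv (-(q * d + c)) d) = q + (if 0 < c then 1 else 0) := by
  rw [PySem.Int.neg_floordiv_neg_eq_iff_of_pos hd]
  split_ifs with hc
  · constructor <;> nlinarith
  · have hc0 : c = 0 := by omega
    subst hc0
    constructor <;> nlinarith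

-- while spaces remain, the remaining count q*d + c (0 ≤ c < d) is nonzero
lemma rem_ne (q d c : Int) (hd : 0 < d) (hc0 : 0 ≤ c) (hcd : c < d) (h : q ≠ 0 ∨ 0 < c) :
    q * d + c ≠ 0 := by
  rcases lt_trichotomy q 0 with hq | hq | hq
  · have h1 : q * d ≤ -d := by nlinarith
    intro h0; linarith
  · subst hq
    rcases h with h | h
    · exact absurd rfl h
    · intro h0; omega
  · have h1 : 0 < q * d := mul_pos hq hd
    intro h0; linarith

-- main invariant: while spaces remain, A's state at index i is
-- (q*(g-i) + (r - min i r), g - i), and both loops emit the same word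
lemma active (q r g : Int) (hq0 : 0 ≤ q) (hg : 0 < g) (hr0 : 0 ≤ r) (hrg : r < g) :
    ∀ ws (i : Int), 0 ≤ i → i < g → (q ≠ 0 ∨ i < r) →
      pvALoop (some (q * (g - i) + (r - min i r))) (g - i) ws = pvBLoop q r g i ws := by
  intro ws
  induction ws with
  | nil => intro i _ _ _; rfl
  | cons w ws ih =>
      intro i hi0 hig hqr
      set c : Int := r - min i r with hc
      have hc0 : 0 ≤ c := by omega
      have hcd : c < g - i := by omega
      have hcpos : (0 < c) ↔ (i < r) := by omega
      have hrem : q * (g - i) + c ≠ 0 :=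
        rem_ne q (g - i) c (by omega) hc0 hcd (by rcases hqr with h | h; exacts [Or.inl h, Or.inr (hcpos.mpr h)])
      have hsg : g - i ≠ 0 := by omega
      have heq : (if 0 < c then (1 : Int) else 0) = (if i < r then 1 else 0) := by
        by_cases h : i < r
        · rw [if_pos h, if_pos (hcpos.mpr h)]
        · rw [if_neg h, if_neg (fun hh => h (hcpos.mp hh))]
      have hwsp : -(PySem.Int.floordiv (-(q * (g - i) + c)) (g - i))
          = q + (if i < r then 1 else 0) := by
        rw [ceil_val q c (g - i) (by omega) hc0 hcd, heq]
      have hwpos : 0 < q + (if i < r then 1 else 0) := by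
        rcases hqr with h | h
        · have : 0 < q := by omega
          split_ifs <;> omega
        · rw [if_pos h]; omega
      simp only [pvALoop, pvBLoop]
      rw [if_pos ⟨hrem, hsg⟩, if_neg (by omega : ¬ g ≤ i), hwsp]
      simp only [if_pos hwpos]
      congr 1
      -- tail: the new state is the invariant at i+1, or both loops are frozen
      have hstate : q * (g - i) + c - (q + (if i < r then 1 else 0))
          = q * (g - (i + 1)) + (r - min (i + 1) r) := by
        by_cases h : i < r
        · rw [if_pos h]
          have h1 : min i r = i := by omega
          have h2 : min (i + 1) r = i + 1 := by omega
          rw [hc, h1, h2]; ring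
        · rw [if_neg h]
          have h1 : min i r = r := by omega
          have h2 : min (i + 1) r = r := by omega
          rw [hc, h1, h2]; ring
      have hsg1 : g - i - 1 = g - (i + 1) := by ring
      rw [hstate, hsg1]
      by_cases hnext : i + 1 < g ∧ (q ≠ 0 ∨ i + 1 < r)
      · exact ih (i + 1) (by omega) hnext.1 hnext.2
      · -- loop exits here: the remaining spaces are exactly 0
        have hzero : q * (g - (i + 1)) + (r - min (i + 1) r) = 0 := by
          rcases not_and_or.mp hnext with h | h
          · have hieq : i + 1 = g := by omega
            have h1 : min (i + 1) r = r := by omega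
            have h2 : g - (i + 1) = 0 := by omega
            rw [h1, h2, mul_zero]; ring
          · push_neg at h
            have hq0' : q = 0 := h.1
            have h1 : min (i + 1) r = r := by omega
            rw [hq0', h1, zero_mul]; ring
        rw [hzero, aloop_zero]
        rw [bloop_newlines q r g hq0 ws (i + 1)]
        rcases not_and_or.mp hnext with h | h
        · left; omega
        · push_neg at h
          right; exact ⟨h.1, by omega⟩

-- ===== VERDICT (by name: the statement is the Claim_ definition above) =====
theorem justified_line_stream_spec : Claim_equal_justified_line_stream := by
  intro line maxlen spaces last_line _hdom hpre
  unfold Spec_justified_line_stream justified_line_stream justified_line_stream_alt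
  cases last_line with
  | true => simp
  | false =>
      rw [if_pos (by simp), if_neg (by simp)]
      set g : Int := (line.length : Int) - 1 with hg
      cases spaces with
      | none =>
          rw [aloop_none]
          rw [bloop_newlines 0 0 g le_rfl line 0 (by right; omega)]
      | some s =>
          dsimp only
          by_cases hs : s = 0
          · subst hs
            rw [if_neg (by simp)]
            rw [aloop_zero, bloop_newlines 0 0 g le_rfl line 0 (by right; omega)]
          · by_cases hgpos : 0 < g
            · have hs0 : 0 ≤ s := by
                rcases hpre with h | h | h
                · exact h
                · simp at h
                · omega
              rw [if_pos ⟨hs, by omega⟩]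
              set q : Int := PySem.Int.floordiv s g with hq
              set r : Int := PySem.Int.mod s g with hr
              have hdm : q * g + r = s := PySem.Int.floordiv_mul_add_mod s g
              have hr0 : 0 ≤ r := PySem.Int.mod_nonneg s hgpos
              have hrg : r < g := PySem.Int.mod_lt s hgpos
              have hqnn : 0 ≤ q := by nlinarith
              have hqr0 : q ≠ 0 ∨ (0 : Int) < r := by
                rcases eq_or_ne q 0 with hq0 | hq0
                · right
                  have hrne : r ≠ 0 := by
                    intro h0; apply hs; rw [← hdm, hq0, h0]; ring
                  omega
                · left; exact hq0
              have hact := active q r g hqnn hgpos hr0 hrg line 0 le_rfl hgpos hqr0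
              have hmin : min 0 r = 0 := by omega
              simp only [sub_zero, hmin] at hact
              rw [hdm] at hact
              simpa using hact
            · -- g ≤ 0: at most one word, so the loop body's then-branch never runs in A
              cases line with
              | nil => rfl
              | cons w ws =>
                  have hg0 : g = 0 := by
                    have hlen : (((w :: ws).length : Int)) = (ws.length : Int) + 1 := by
                      simp
                    omega
                  rw [hg0]
                  rw [if_neg (fun h => h.2 rfl)]
                  rw [aloop_sgzero]
                  simpa using (bloop_newlines 0 0 0 le_rfl (w :: ws) 0 (Or.inl le_rfl)).symm
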